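-- pv_equiv track=rewrite | github.com/hackastic03/TubesDaspro_PythonGame | parser.py | app
-- ===== SOURCE A (Python) =====
-- def app(file, x):
--     line = 0
--     for i in file:
--         line += 1
--     newfile = [0 for i in range(line+1)]
--     for i in range(line):
--         newfile[i] = file[i]
--     newfile[line] = x
--     line += 1
--     return newfile
-- ===== SOURCE B (Python) =====
-- def app(file, x):
--     return list(file) + [x]
-- ===== Notes on version B (the rewrite author's own statement) =====
-- stated objective: simpler
-- what changed: Replaces the manual length-counting loop, zero-preallocation and index-by-index copy loop with a single copy-and-concatenate expression list(file) + [x].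
import Mathlib
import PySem

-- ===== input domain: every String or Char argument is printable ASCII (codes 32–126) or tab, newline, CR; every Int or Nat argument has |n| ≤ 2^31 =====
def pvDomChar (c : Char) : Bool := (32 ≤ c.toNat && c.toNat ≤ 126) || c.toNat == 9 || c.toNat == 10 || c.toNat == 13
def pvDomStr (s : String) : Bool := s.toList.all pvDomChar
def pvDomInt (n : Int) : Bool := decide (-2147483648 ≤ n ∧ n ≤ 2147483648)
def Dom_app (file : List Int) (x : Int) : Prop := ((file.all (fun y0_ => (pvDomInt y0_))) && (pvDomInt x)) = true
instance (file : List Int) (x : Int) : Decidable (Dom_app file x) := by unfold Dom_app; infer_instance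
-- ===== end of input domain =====

-- B replaces A's three passes (count length, preallocate zeros, copy by index) with one
-- copy-and-concatenate `list(file) + [x]`; objective: simpler.

-- ===== PORT A =====
def app (file : List Int) (x : Int) : List Int :=
  -- line = 0; for i in file: line += 1
  let line : Int := file.foldl (fun acc _ => acc + 1) 0
  -- newfile = [0 for i in range(line+1)]
  let newfile : List Int := (PySem.List.pyRange 0 (line + 1) 1).map (fun _ => 0)
  -- for i in range(line): newfile[i] = file[i]   (indices always in range)
  let newfile := (PySem.List.pyRange 0 line 1).foldl
    (fun nf i => nf.set i.toNat (PySem.List.pyGetD file i 0)) newfile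
  -- newfile[line] = x
  newfile.set line.toNat x

-- ===== PORT B =====
def app_alt (file : List Int) (x : Int) : List Int := file ++ [x]

-- ===== PRECONDITION & SPEC =====
def Spec_app (file : List Int) (x : Int) (out : List Int) : Prop := out = app_alt file x
instance (file : List Int) (x : Int) (out : List Int) : Decidable (Spec_app file x out) := by unfold Spec_app; infer_instance

-- ===== CLAIM (what is proved, stated in full; the proofs are below) =====
def Claim_equal_app : Prop := ∀ (file : List Int) (x : Int), Dom_app file x → Spec_app file x (app file x)

-- ===== LEMMAS AND PROOFS =====

theorem app_len_foldl (file : List Int) :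
    file.foldl (fun acc _ => acc + 1) 0 = (file.length : Int) := by
  suffices h : ∀ (c : Int), file.foldl (fun acc _ => acc + 1) c = c + file.length by
    simpa using h 0
  induction file with
  | nil => simp
  | cons a t ih => intro c; simp [List.foldl, ih]; ring

theorem app_zeros (n : Int) (_hn : 0 ≤ n) :
    (PySem.List.pyRange 0 n 1).map (fun _ => (0 : Int)) = List.replicate n.toNat 0 := by
  refine List.eq_replicate_iff.mpr ⟨?_, ?_⟩
  · simp [PySem.List.length_pyRange_one]
  · intro b hb
    obtain ⟨a, -, h⟩ := List.mem_map.mp hb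
    exact h.symm

-- the copy loop: after processing range(0, k), the first k cells hold file's prefix
theorem app_copy_loop (file : List Int) (k : Nat)
    (hk : k ≤ file.length) :
    (PySem.List.pyRange 0 (k : Int) 1).foldl
      (fun nf i => nf.set i.toNat (PySem.List.pyGetD file i 0))
      (List.replicate (file.length + 1) 0) =
    file.take k ++ List.replicate (file.length + 1 - k) 0 := by
  induction k with
  | zero => simp [PySem.List.pyRange_one_eq_nil]
  | succ m ih =>
    have hm : m ≤ file.length := Nat.le_of_succ_le hk
    have hsplit : PySem.List.pyRange 0 ((m : Int) + 1) 1 =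
        PySem.List.pyRange 0 (m : Int) 1 ++ [(m : Int)] :=
      PySem.List.pyRange_one_succ_right (by positivity)
    have : ((m : Int) + 1) = ((m + 1 : Nat) : Int) := by push_cast; ring
    rw [← this, hsplit, List.foldl_append, ih hm]
    simp only [List.foldl]
    have hget : PySem.List.pyGetD file (m : Int) 0 = file[m]'(Nat.lt_of_succ_le hk) := by
      rw [PySem.List.pyGetD_eq_getElem _ _ _
        (by exact_mod_cast Nat.lt_of_succ_le hk : (m : Int) < (file.length : Int))]
      · simp
      · exact Int.natCast_nonneg m
    rw [hget]
    have htoNat : ((m : Int)).toNat = m := Int.toNat_natCast m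
    rw [htoNat]
    -- set index m in (take m ++ replicate (len+1-m) 0): first cell of the replicate
    have hlen : (file.take m).length = m := List.length_take_of_le hm
    rw [List.set_append_right _ _ (by omega)]
    have h1 : file.length + 1 - m = (file.length - m) + 1 := by omega
    rw [hlen, Nat.sub_self, h1, List.replicate_succ, List.set_cons_zero]
    have htake : file.take (m + 1) = file.take m ++ [file[m]'(Nat.lt_of_succ_le hk)] :=
      List.take_succ_eq_append_getElem (Nat.lt_of_succ_le hk)
    have h2 : file.length + 1 - (m + 1) = file.length - m := by omega
    rw [htake, List.append_assoc, h2]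
    simp

theorem app_eq (file : List Int) (x : Int) : app file x = file ++ [x] := by
  have hz : (PySem.List.pyRange 0 ((file.length : Int) + 1) 1).map (fun _ => (0 : Int)) =
      List.replicate (file.length + 1) 0 := by
    have := app_zeros ((file.length : Int) + 1) (by positivity)
    rwa [show ((file.length : Int) + 1).toNat = file.length + 1 by omega] at this
  have hcopy := app_copy_loop file file.length le_rfl
  unfold app
  simp only [app_len_foldl, hz, hcopy, List.take_length, Nat.add_sub_cancel_left,
    Int.toNat_natCast]
  rw [List.set_append_right _ _ le_rfl]
  simp

-- ===== VERDICT (by name: the statement is the Claim_ definition above) =====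
theorem app_spec : Claim_equal_app := by
  intro file x _
  unfold Spec_app app_alt
  exact app_eq file x
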